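-- pv_equiv track=rewrite | github.com/Raha-R8/Threes_game | part5.py | mat_score
-- ===== SOURCE A (Python) =====
-- def mat_score(mat):
--     score=0
--     for i in mat:
--         for j in i:
--             count_tavan=-1
--             if j==0 or j==1 or j==2:
--                 continue
--             else:
--                 num=j//3
--                 while num!=0:
--                     num=num//2
--                     count_tavan+=1
--             score += 3**(count_tavan+1)
--     return score
-- ===== SOURCE B (Python) =====
-- def mat_score(mat):
--     counts = {}
--     for row in mat:
--         for v in row:
--             counts[v] = counts.get(v, 0) + 1
--     score = 0
--     for v, c in counts.items():
--         if v > 2: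
--             score += c * 3 ** (v // 3).bit_length()
--     return score
-- ===== Notes on version B (the rewrite author's own statement) =====
-- stated objective: alternative
-- what changed: B first builds a frequency dictionary of all cell values in one nested pass, then computes the score once per DISTINCT value as count * 3 ** (v // 3).bit_length(), replacing A's per-cell inner halving while-loop entirely.
import Mathlib
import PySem

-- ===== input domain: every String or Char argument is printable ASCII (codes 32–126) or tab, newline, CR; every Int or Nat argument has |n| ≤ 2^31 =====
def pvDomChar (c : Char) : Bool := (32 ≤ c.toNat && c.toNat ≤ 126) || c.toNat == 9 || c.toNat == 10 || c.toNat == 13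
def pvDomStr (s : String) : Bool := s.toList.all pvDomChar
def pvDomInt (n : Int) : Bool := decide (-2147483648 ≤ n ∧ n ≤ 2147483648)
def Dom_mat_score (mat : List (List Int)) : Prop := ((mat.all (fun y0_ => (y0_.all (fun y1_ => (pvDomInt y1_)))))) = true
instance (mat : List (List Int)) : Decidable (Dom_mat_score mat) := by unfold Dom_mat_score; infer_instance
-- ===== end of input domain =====

-- B tallies the cell values into a frequency dictionary first and then scores each DISTINCT
-- value once as count * 3 ^ (v // 3).bit_length(), instead of A's per-cell halving while-loop
-- (objective: alternative).

-- ===== PORT A =====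
-- A's 'while num != 0: num = num//2; count_tavan += 1', made total with fuel;
-- fuel num.toNat + 1 is enough for every nonnegative num (the loop halves num).
def pvCountLoop : Nat → Int → Int → Int
  | 0, _, count => count
  | fuel+1, num, count =>
      if num ≠ 0 then pvCountLoop fuel (PySem.Int.floordiv num 2) (count + 1)
      else count

def mat_score (mat : List (List Int)) : Int :=
  mat.foldl (fun score i =>
    i.foldl (fun score j =>
      if j = 0 ∨ j = 1 ∨ j = 2 then score
      else
        let num := PySem.Int.floordiv j 3
        let count_tavan := pvCountLoop (num.toNat + 1) num (-1)
        score + 3 ^ (count_tavan + 1).toNat) score) 0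

-- ===== PORT B =====
def mat_score_alt (mat : List (List Int)) : Int :=
  let counts : PySem.Dict Int Int :=
    mat.foldl (fun counts row =>
      row.foldl (fun counts v => counts.insert v (counts.getD v 0 + 1)) counts)
      PySem.Dict.empty
  counts.items.foldl (fun score p =>
    if 2 < p.1 then score + p.2 * 3 ^ PySem.Int.bitLength (PySem.Int.floordiv p.1 3)
    else score) 0

-- ===== PRECONDITION & SPEC =====
-- Pre_ excludes matrices with a negative entry: on any negative j, A's inner
-- 'while num != 0: num = num // 2' never terminates (num stays -1), so A does not return.
def Pre_mat_score (mat : List (List Int)) : Prop :=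
  ∀ row ∈ mat, ∀ v ∈ row, 0 ≤ v
instance (mat : List (List Int)) : Decidable (Pre_mat_score mat) := by
  unfold Pre_mat_score; infer_instance
def pvWitness_mat_score : List (List Int) := [[0, 3, 10, 1], [27, 2]]

def Spec_mat_score (mat : List (List Int)) (out : Int) : Prop := out = mat_score_alt mat
instance (mat : List (List Int)) (out : Int) : Decidable (Spec_mat_score mat out) := by unfold Spec_mat_score; infer_instance

-- ===== CLAIM (what is proved, stated in full; the proofs are below) =====
def Claim_equal_mat_score : Prop := ∀ (mat : List (List Int)), Dom_mat_score mat → Pre_mat_score mat → Spec_mat_score mat (mat_score mat)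

-- ===== LEMMAS AND PROOFS =====

-- per-cell contribution both programs account for
def pvCell (j : Int) : Int :=
  if 2 < j then 3 ^ PySem.Int.bitLength (PySem.Int.floordiv j 3) else 0

theorem pvCountLoop_eq (fuel : Nat) : ∀ (num : Int), 0 ≤ num → num < 2 ^ fuel →
    ∀ count : Int, pvCountLoop fuel num count = count + PySem.Int.bitLength num := by
  induction fuel with
  | zero =>
    intro num h0 h1 count
    have : num = 0 := by simpa using by omega
    subst this
    simp [pvCountLoop]
  | succ fuel ih =>
    intro num h0 h1 count
    by_cases h : num = 0
    · subst h; simp [pvCountLoop]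
    · have hpos : 0 < num := by omega
      have hdiv : PySem.Int.floordiv num 2 = num / 2 :=
        PySem.Int.floordiv_eq_ediv_of_pos (by omega)
      have h2 : (0:Int) ≤ num / 2 := by omega
      have h3 : num / 2 < 2 ^ fuel := by
        have : (2:Int) ^ (fuel + 1) = 2 ^ fuel * 2 := by ring
        omega
      rw [pvCountLoop, if_pos h, hdiv, ih _ h2 h3,
        PySem.Int.bitLength_of_pos hpos, hdiv]
      push_cast
      ring

-- A's inner fold over a row adds the cell contributions
theorem mat_score_row (row : List Int) (hrow : ∀ v ∈ row, 0 ≤ v) :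
    ∀ s : Int, row.foldl (fun score j =>
      if j = 0 ∨ j = 1 ∨ j = 2 then score
      else
        let num := PySem.Int.floordiv j 3
        let count_tavan := pvCountLoop (num.toNat + 1) num (-1)
        score + 3 ^ (count_tavan + 1).toNat) s = s + (row.map pvCell).sum := by
  induction row with
  | nil => intro s; simp
  | cons j row ih =>
    intro s
    have hj : 0 ≤ j := hrow j (by simp)
    have ih' := ih (fun v hv => hrow v (by simp [hv]))
    simp only [List.foldl_cons, List.map_cons, List.sum_cons]
    by_cases h : j = 0 ∨ j = 1 ∨ j = 2
    · have hc : pvCell j = 0 := by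
        unfold pvCell
        rcases h with h | h | h <;> subst h <;> decide
      rw [if_pos h, ih', hc]; ring
    · have h3 : 3 ≤ j := by omega
      have hnum : (0:Int) ≤ PySem.Int.floordiv j 3 := by
        rw [PySem.Int.floordiv_eq_ediv_of_pos (by omega : (0:Int) < 3)]; omega
      set num := PySem.Int.floordiv j 3 with hn
      have hlt : num < 2 ^ (num.toNat + 1) := by
        have h1 : (num.toNat : Int) = num := Int.toNat_of_nonneg hnum
        have h2 : num.toNat < 2 ^ (num.toNat + 1) :=
          Nat.lt_of_lt_of_le Nat.lt_two_pow_self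
            (Nat.pow_le_pow_right (by norm_num) (Nat.le_succ _))
        calc num = (num.toNat : Int) := h1.symm
          _ < ((2 ^ (num.toNat + 1) : Nat) : Int) := by exact_mod_cast h2
          _ = 2 ^ (num.toNat + 1) := by push_cast; ring
      have hloop := pvCountLoop_eq (num.toNat + 1) num hnum hlt (-1)
      have hexp : (pvCountLoop (num.toNat + 1) num (-1) + 1).toNat
          = PySem.Int.bitLength num := by
        rw [hloop]; omega
      rw [if_neg h]
      rw [show (s + 3 ^ (pvCountLoop (num.toNat + 1) num (-1) + 1).toNat)
            = s + pvCell j from by rw [hexp]; unfold pvCell; rw [if_pos (show 2 < j by omega)]]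
      rw [ih']
      ring

-- A's value is the sum of per-cell contributions over the flattened matrix
theorem mat_score_eq (mat : List (List Int)) (h : Pre_mat_score mat) :
    mat_score mat = ((mat.flatMap (fun row => row)).map pvCell).sum := by
  unfold mat_score
  have hgen : ∀ (m : List (List Int)), Pre_mat_score m → ∀ a : Int,
      m.foldl (fun score i =>
        i.foldl (fun score j =>
          if j = 0 ∨ j = 1 ∨ j = 2 then score
          else
            let num := PySem.Int.floordiv j 3
            let count_tavan := pvCountLoop (num.toNat + 1) num (-1)
            score + 3 ^ (count_tavan + 1).toNat) score) a
      = a + ((m.flatMap (fun row => row)).map pvCell).sum := by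
    intro m hm
    induction m with
    | nil => intro a; simp
    | cons r m ihm =>
      intro a
      have hr : ∀ v ∈ r, 0 ≤ v := hm r (by simp)
      have hm' : Pre_mat_score m := fun q hq v hv => hm q (by simp [hq]) v hv
      simp only [List.foldl_cons, List.flatMap_cons, List.map_append, List.sum_append]
      rw [mat_score_row r hr a, ihm hm' _]
      ring
  rw [hgen mat h 0]
  ring

-- B's nested counting loop builds Counter(flattened cells)
theorem mat_score_alt_counts (mat : List (List Int)) :
    mat.foldl (fun counts row =>
      row.foldl (fun counts v => counts.insert v (counts.getD v 0 + 1)) counts)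
      PySem.Dict.empty
    = PySem.Dict.counter (mat.flatMap (fun row => row)) := by
  rw [← PySem.Dict.foldl_insert_getD_add_one_eq_counter]
  generalize (PySem.Dict.empty : PySem.Dict Int Int) = d
  induction mat generalizing d with
  | nil => simp
  | cons r m ihm => simp [List.foldl_append, ihm]

-- B's scoring fold over an items list sums the weighted contributions
theorem mat_score_alt_items_fold (l : List (Int × Int)) :
    ∀ s : Int, l.foldl (fun score p =>
      if 2 < p.1 then score + p.2 * 3 ^ PySem.Int.bitLength (PySem.Int.floordiv p.1 3)
      else score) s
    = s + (l.map (fun p => p.2 * pvCell p.1)).sum := by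
  induction l with
  | nil => intro s; simp
  | cons p l ih =>
    intro s
    simp only [List.foldl_cons, List.map_cons, List.sum_cons]
    by_cases h : 2 < p.1
    · rw [if_pos h, ih]
      unfold pvCell
      rw [if_pos h]
      ring
    · rw [if_neg h, ih]
      unfold pvCell
      rw [if_neg h]
      ring

-- summing count v * f v over the distinct values equals summing f over the list
theorem pvDedupCountSum (l : List Int) (f : Int → Int) :
    ((PySem.List.dedup l).map (fun v => (l.count v : Int) * f v)).sum
      = (l.map f).sum := by
  have hnd : (PySem.List.dedup l).Nodup := PySem.List.nodup_dedup l
  have h1 : (PySem.List.dedup l).toFinset = l.toFinset := by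
    ext x; simp
  calc ((PySem.List.dedup l).map (fun v => (l.count v : Int) * f v)).sum
      = ((PySem.List.dedup l).toFinset).sum (fun v => (l.count v : Int) * f v) :=
        (List.sum_toFinset _ hnd).symm
    _ = (l.toFinset).sum (fun v => l.count v • f v) := by
        rw [h1]; apply Finset.sum_congr rfl; intro v _; simp
    _ = (l.map f).sum := (Finset.sum_list_map_count l f).symm

theorem mat_score_alt_eq (mat : List (List Int)) :
    mat_score_alt mat = ((mat.flatMap (fun row => row)).map pvCell).sum := by
  unfold mat_score_alt
  rw [mat_score_alt_counts, mat_score_alt_items_fold, PySem.Dict.items_counter]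
  set l := mat.flatMap (fun row => row)
  rw [List.map_map]
  have : ((fun p : Int × Int => p.2 * pvCell p.1) ∘ fun k => (k, (l.count k : Int)))
      = fun v => (l.count v : Int) * pvCell v := rfl
  rw [← PySem.List.dedup_eq_ofList, this, pvDedupCountSum _ pvCell]
  ring

-- ===== VERDICT (by name: the statement is the Claim_ definition above) =====
theorem mat_score_spec : Claim_equal_mat_score := by
  intro mat _ hpre
  unfold Spec_mat_score
  rw [mat_score_eq mat hpre, mat_score_alt_eq]
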